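-- pv_equiv track=rewrite | github.com/Dipti0704/TalentSearchAI | src/query_pipeline.py | group_by_resume
-- ===== SOURCE A (Python) =====
-- def group_by_resume(resumes):
--
--     grouped = {}
--
--     for r in resumes:
--
--         file_name = r["file_name"]
--
--         if file_name not in grouped:
--             grouped[file_name] = ""
--
--         grouped[file_name] += " " + r["text"]
--
--     return grouped
-- ===== SOURCE B (Python) =====
-- def group_by_resume(resumes):
--     # Staged nested-scan: first collect the distinct file names in order of
--     # first appearance, then for each file name re-scan the whole list and
--     # join all of its chunks (each prefixed by a space) in one go.
--     order = []
--     for r in resumes: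
--         if r["file_name"] not in order:
--             order.append(r["file_name"])
--     return {fn: "".join(" " + r["text"] for r in resumes if r["file_name"] == fn)
--             for fn in order}
-- ===== Notes on version B (the rewrite author's own statement) =====
-- stated objective: alternative
-- what changed: B replaces A's single-pass dict accumulation with a staged nested-scan: it first collects the distinct file names in first-occurrence order, then for each name re-scans the whole list and joins that name's chunks once; it trades A's one-pass O(n) dict update for an O(k*n) per-key scan.
import Mathlib
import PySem

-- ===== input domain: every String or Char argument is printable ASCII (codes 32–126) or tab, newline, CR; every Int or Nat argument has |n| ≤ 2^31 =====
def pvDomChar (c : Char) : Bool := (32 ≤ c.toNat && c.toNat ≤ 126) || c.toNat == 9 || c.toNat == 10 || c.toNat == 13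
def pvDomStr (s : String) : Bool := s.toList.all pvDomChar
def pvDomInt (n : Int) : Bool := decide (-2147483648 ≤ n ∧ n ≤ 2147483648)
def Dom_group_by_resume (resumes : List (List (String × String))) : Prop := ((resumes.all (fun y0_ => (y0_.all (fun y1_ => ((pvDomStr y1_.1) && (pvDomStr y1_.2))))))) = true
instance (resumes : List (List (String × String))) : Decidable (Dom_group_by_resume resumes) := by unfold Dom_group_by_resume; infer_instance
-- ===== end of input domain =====

-- B collects the distinct file names first and then, per file name, re-scans the
-- list and joins that name's chunks once (staged nested-scan instead of A's
-- single-pass dict accumulation); same return value on Pre_.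


-- ===== PORT A =====
-- r["file_name"] / r["text"]: first-match lookup in the association list; Pre_ guarantees the
-- key is present (Python raises KeyError otherwise), so the `.getD ""` arm is never reached on Pre_.
def group_by_resume (resumes : List (List (String × String))) : List (String × String) :=
  (resumes.foldl
    (fun grouped r =>
      let file_name := ((PySem.Dict.mk r).get? "file_name").getD ""
      let grouped := if grouped.contains file_name then grouped else grouped.insert file_name ""
      grouped.insert file_name (grouped.getD file_name "" ++ (" " ++ ((PySem.Dict.mk r).get? "text").getD "")))
    PySem.Dict.empty).items

-- ===== PORT B =====
def group_by_resume_alt (resumes : List (List (String × String))) : List (String × String) :=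
  let order := resumes.foldl
    (fun ks r =>
      if ks.contains (((PySem.Dict.mk r).get? "file_name").getD "") then ks
      else ks ++ [((PySem.Dict.mk r).get? "file_name").getD ""]) []
  order.map (fun fn =>
    (fn, PySem.Str.join ""
      ((resumes.filter (fun r => ((PySem.Dict.mk r).get? "file_name").getD "" == fn)).map
        (fun r => " " ++ ((PySem.Dict.mk r).get? "text").getD ""))))

-- ===== PRECONDITION & SPEC =====
-- Pre_ excludes exactly the inputs where Python A raises KeyError: a resume record
-- missing the "file_name" or "text" key (B raises there too).
def Pre_group_by_resume (resumes : List (List (String × String))) : Prop :=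
  ∀ r ∈ resumes, "file_name" ∈ r.map Prod.fst ∧ "text" ∈ r.map Prod.fst
instance (resumes : List (List (String × String))) : Decidable (Pre_group_by_resume resumes) := by unfold Pre_group_by_resume; infer_instance

def pvWitness_group_by_resume : (List (List (String × String))) :=
  [[("file_name", "a.pdf"), ("text", "hello")], [("file_name", "b.pdf"), ("text", "hi")], [("file_name", "a.pdf"), ("text", "bye")]]

def Spec_group_by_resume (resumes : List (List (String × String))) (out : List (String × String)) : Prop := out = group_by_resume_alt resumes
instance (resumes : List (List (String × String))) (out : List (String × String)) : Decidable (Spec_group_by_resume resumes out) := by unfold Spec_group_by_resume; infer_instance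

-- ===== CLAIM (what is proved, stated in full; the proofs are below) =====
def Claim_equal_group_by_resume : Prop := ∀ (resumes : List (List (String × String))), Dom_group_by_resume resumes → Pre_group_by_resume resumes → Spec_group_by_resume resumes (group_by_resume resumes)

-- ===== LEMMAS AND PROOFS =====

-- abbreviations for the two record lookups
def pvKey (r : List (String × String)) : String := ((PySem.Dict.mk r).get? "file_name").getD ""
def pvTxt (r : List (String × String)) : String := ((PySem.Dict.mk r).get? "text").getD ""

-- the value transformation relating the intermediate chunk lists to joined strings
def pvJoin (ts : List String) : String := PySem.Str.join "" (ts.map (fun t => " " ++ t))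
def pvPair (p : String × List String) : String × String := (p.1, pvJoin p.2)

theorem join_empty_sep (ls : List (List Char)) :
    PySem.Chars.join [] ls = ls.flatten := by
  induction ls with
  | nil => simp [PySem.Chars.join_nil]
  | cons p rest ih =>
    cases rest with
    | nil => simp [PySem.Chars.join_singleton]
    | cons q rs => rw [PySem.Chars.join_cons_cons]; simp [ih]

theorem pvJoin_toList (ts : List String) :
    (pvJoin ts).toList = (ts.map (fun t => ' ' :: t.toList)).flatten := by
  simp [pvJoin, PySem.Str.toList_join, join_empty_sep, Function.comp_def]

theorem pvJoin_append (ts : List String) (t : String) :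
    pvJoin (ts ++ [t]) = pvJoin ts ++ (" " ++ t) := by
  apply String.toList_inj.mp
  simp [pvJoin_toList]

theorem contains_map_pvPair (l : List (String × List String)) (k : String) :
    (PySem.Dict.mk (l.map pvPair)).contains k = (PySem.Dict.mk l).contains k := by
  simp [PySem.Dict.contains, List.any_map, pvPair, Function.comp_def]

theorem getD_map_pvPair (l : List (String × List String)) (k : String) :
    (PySem.Dict.mk (l.map pvPair)).getD k "" = pvJoin ((PySem.Dict.mk l).getD k []) := by
  induction l with
  | nil =>
    apply String.toList_inj.mp
    simp [PySem.Dict.getD, PySem.Dict.get?, pvJoin_toList]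
  | cons p rest ih =>
    by_cases h : p.1 = k
    · simp [PySem.Dict.getD, PySem.Dict.get?, pvPair, h]
    · simpa [PySem.Dict.getD, PySem.Dict.get?, pvPair, h] using ih

-- one iteration of A's loop, seen through pvPair, is a modify on the chunk-list dict
theorem step_rel (l : List (String × List String)) (k t : String) :
    (let grouped := PySem.Dict.mk (l.map pvPair)
     let grouped := if grouped.contains k then grouped else grouped.insert k ""
     grouped.insert k (grouped.getD k "" ++ (" " ++ t))) =
    PySem.Dict.mk ((((PySem.Dict.mk l).modify k [] (fun ts => ts ++ [t])).items).map pvPair) := by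
  by_cases h : (PySem.Dict.mk l).contains k
  · have h' : (PySem.Dict.mk (l.map pvPair)).contains k := by
      rw [contains_map_pvPair]; exact h
    simp only [h', if_pos]
    apply PySem.Dict.ext
    rw [PySem.Dict.items_insert_of_contains _ _ h', getD_map_pvPair,
        PySem.Dict.modify, PySem.Dict.items_insert_of_contains _ _ h]
    simp only [List.map_map]
    apply List.map_congr_left
    intro p _
    by_cases hp : p.1 = k <;>
      simp [pvPair, hp, pvJoin_append, PySem.Dict.getD]
  · have h' : ¬ (PySem.Dict.mk (l.map pvPair)).contains k := by
      rw [contains_map_pvPair]; exact h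
    simp only [h', if_neg, Bool.not_eq_true]
    rw [PySem.Dict.insert_insert_self, PySem.Dict.getD_insert_self]
    apply PySem.Dict.ext
    rw [PySem.Dict.items_insert_of_not_contains _ _ (Bool.eq_false_iff.mpr h'),
        PySem.Dict.modify, PySem.Dict.items_insert_of_not_contains _ _ (Bool.eq_false_iff.mpr h),
        PySem.Dict.getD_of_not_contains _ _ (Bool.eq_false_iff.mpr h)]
    simp only [List.map_append, List.map_cons, List.map_nil, pvPair]
    refine congrArg (l.map pvPair ++ ·) ?_
    refine congrArg (fun v => [(k, v)]) ?_
    apply String.toList_inj.mp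
    simp [pvJoin_toList]

-- A's whole loop, seen through pvPair, is the chunk-list-building modify loop
theorem loop_rel (resumes : List (List (String × String))) (l : List (String × List String)) :
    (resumes.foldl
      (fun grouped r =>
        let file_name := ((PySem.Dict.mk r).get? "file_name").getD ""
        let grouped := if grouped.contains file_name then grouped else grouped.insert file_name ""
        grouped.insert file_name (grouped.getD file_name "" ++ (" " ++ ((PySem.Dict.mk r).get? "text").getD "")))
      (PySem.Dict.mk (l.map pvPair))) =
    PySem.Dict.mk (((resumes.foldl
      (fun d r =>
        d.modify (((PySem.Dict.mk r).get? "file_name").getD "") []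
          (fun ts => ts ++ [((PySem.Dict.mk r).get? "text").getD ""]))
      (PySem.Dict.mk l)).items).map pvPair) := by
  induction resumes generalizing l with
  | nil => rfl
  | cons r rest ih =>
    simp only [List.foldl_cons]
    rw [step_rel]
    exact ih _

-- the chunk-list dict, characterised: keys in first-occurrence order, values by filter
def pvM (resumes : List (List (String × String))) : PySem.Dict String (List String) :=
  resumes.foldl (fun d r => d.modify (pvKey r) [] (fun ts => ts ++ [pvTxt r])) PySem.Dict.empty

theorem pvM_keys (resumes : List (List (String × String))) :
    (pvM resumes).keys = PySem.Set.ofList (resumes.map pvKey) := by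
  rw [pvM, PySem.Dict.keys_foldl_modify_key]
  simp [PySem.Set.update_nil_left]

theorem pvM_nodup (resumes : List (List (String × String))) :
    (pvM resumes).keys.Nodup := by
  rw [pvM_keys]; exact PySem.Set.nodup_ofList _

theorem pvM_getD (resumes : List (List (String × String))) (k : String) :
    (pvM resumes).getD k [] = (resumes.filter (fun r => pvKey r == k)).map pvTxt := by
  have h : pvM resumes =
      (resumes.map (fun r => (pvKey r, pvTxt r))).foldl
        (fun d p => d.modify p.1 [] (fun ts => ts ++ [p.2])) PySem.Dict.empty := by
    rw [List.foldl_map]; rfl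
  rw [h]
  rw [PySem.Dict.getD_foldl_modify_append]
  simp [List.filter_map, List.map_map, Function.comp_def]

theorem pvM_items (resumes : List (List (String × String))) :
    (pvM resumes).items =
      (PySem.Set.ofList (resumes.map pvKey)).map
        (fun k => (k, (resumes.filter (fun r => pvKey r == k)).map pvTxt)) := by
  rw [PySem.Dict.items_eq_map_keys (pvM resumes) (pvM_nodup resumes) []]
  rw [pvM_keys]
  apply List.map_congr_left
  intro k _
  rw [pvM_getD]

-- B's first pass builds exactly the set of keys in first-occurrence order
theorem order_eq_ofList (resumes : List (List (String × String))) :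
    resumes.foldl
      (fun ks r =>
        if ks.contains (((PySem.Dict.mk r).get? "file_name").getD "") then ks
        else ks ++ [((PySem.Dict.mk r).get? "file_name").getD ""]) [] =
    PySem.Set.ofList (resumes.map pvKey) := by
  rw [← PySem.Set.update_nil_left, PySem.Set.update_map_eq_foldl_add]
  have hf : (fun (s : List String) (r : List (String × String)) => PySem.Set.add s (pvKey r)) =
      (fun ks r =>
        if ks.contains (((PySem.Dict.mk r).get? "file_name").getD "") then ks
        else ks ++ [((PySem.Dict.mk r).get? "file_name").getD ""]) := by
    funext s r
    simp [PySem.Set.add, pvKey]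
  rw [hf]

-- ===== VERDICT (by name: the statement is the Claim_ definition above) =====
theorem group_by_resume_spec : Claim_equal_group_by_resume := by
  intro resumes _ _
  unfold Spec_group_by_resume group_by_resume group_by_resume_alt
  have h := loop_rel resumes []
  simp only [List.map_nil] at h
  rw [show (PySem.Dict.empty : PySem.Dict String String) = PySem.Dict.mk [] from rfl, h]
  rw [show (resumes.foldl
      (fun d r =>
        d.modify (((PySem.Dict.mk r).get? "file_name").getD "") []
          (fun ts => ts ++ [((PySem.Dict.mk r).get? "text").getD ""]))
      (PySem.Dict.mk [])) = pvM resumes from rfl]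
  rw [order_eq_ofList, pvM_items]
  simp only [List.map_map]
  apply List.map_congr_left
  intro k _
  simp [pvPair, pvJoin, pvKey, pvTxt, List.map_map, Function.comp_def]
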